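-- pv_equiv track=rewrite | github.com/kiryuchi10/ai-ui-builder | autodevflow/agent/tools/nl2api.py | _infer_spec_from_ui
-- ===== SOURCE A (Python) =====
-- from typing import Dict, List, Any, Optional
--
-- def _infer_spec_from_ui(ui_components: List[Dict]) -> str:
--     """Infer API specification from UI components"""
--     spec_parts = []
--
--     # Check for authentication components
--     has_login = any("login" in comp.get("primary_text", "").lower() for comp in ui_components)
--     has_register = any("register" in comp.get("primary_text", "").lower() or
--                       "sign up" in comp.get("primary_text", "").lower() for comp in ui_components)
--
--     if has_login or has_register:
--         spec_parts.append("Create authentication system with login and registration")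
--
--     # Check for form components
--     input_components = [comp for comp in ui_components if comp.get("class_label") == "input"]
--     if len(input_components) >= 2:
--         spec_parts.append("Create form handling endpoints for user data submission")
--
--     # Check for data display components
--     has_tables = any(comp.get("class_label") == "table" for comp in ui_components)
--     has_lists = any(comp.get("class_label") == "list" for comp in ui_components)
--     has_cards = any(comp.get("class_label") == "card" for comp in ui_components)
--
--     if has_tables or has_lists or has_cards:
--         spec_parts.append("Create CRUD endpoints for data management")
--
--     # Default specification
--     if not spec_parts:
--         spec_parts.append("Create basic REST API with user management")
--
--     return ". ".join(spec_parts)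
-- ===== SOURCE B (Python) =====
-- def _infer_spec_from_ui(ui_components):
--     """Single pass over the components; same spec strings and join order."""
--     has_login = has_register = has_table = has_list = has_card = False
--     input_count = 0
--     for comp in ui_components:
--         text = comp.get("primary_text", "").lower()
--         has_login = has_login or ("login" in text)
--         has_register = has_register or ("register" in text) or ("sign up" in text)
--         label = comp.get("class_label", "")
--         if label == "input":
--             input_count += 1
--         elif label == "table":
--             has_table = True
--         elif label == "list":
--             has_list = True
--         elif label == "card":
--             has_card = True
--     spec_parts = []
--     if has_login or has_register:
--         spec_parts.append("Create authentication system with login and registration")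
--     if input_count >= 2:
--         spec_parts.append("Create form handling endpoints for user data submission")
--     if has_table or has_list or has_card:
--         spec_parts.append("Create CRUD endpoints for data management")
--     if not spec_parts:
--         spec_parts.append("Create basic REST API with user management")
--     return ". ".join(spec_parts)
-- ===== Notes on version B (the rewrite author's own statement) =====
-- stated objective: alternative
-- what changed: Replaced A's six independent scans of ui_components (two any() over lowered text, a filter, three any() over class_label) by one loop maintaining boolean flags and an input counter, with the same spec assembly.
import Mathlib
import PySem

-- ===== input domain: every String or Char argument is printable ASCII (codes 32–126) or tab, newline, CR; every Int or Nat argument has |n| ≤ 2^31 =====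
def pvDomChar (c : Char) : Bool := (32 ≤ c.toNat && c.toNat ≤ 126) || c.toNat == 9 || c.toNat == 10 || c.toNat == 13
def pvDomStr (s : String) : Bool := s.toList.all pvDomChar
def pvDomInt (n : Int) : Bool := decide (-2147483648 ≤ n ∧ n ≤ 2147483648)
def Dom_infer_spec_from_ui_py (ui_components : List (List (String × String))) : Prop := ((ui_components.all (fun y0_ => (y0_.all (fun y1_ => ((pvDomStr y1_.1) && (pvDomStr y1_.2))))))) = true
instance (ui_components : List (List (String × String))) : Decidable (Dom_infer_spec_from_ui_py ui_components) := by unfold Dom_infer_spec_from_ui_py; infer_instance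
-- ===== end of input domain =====

-- B replaces A's six independent scans of ui_components by a single loop carrying flags and a counter (same output).

-- ===== PORT A =====
-- comp.get(k, d) on the dict `comp`
def pvGet (comp : List (String × String)) (k d : String) : String :=
  (PySem.Dict.mk comp).getD k d

-- comp.get(k) (default None)
def pvGet? (comp : List (String × String)) (k : String) : Option String :=
  (PySem.Dict.mk comp).get? k

-- comp.get("primary_text", "").lower()
def pvText (comp : List (String × String)) : String :=
  PySem.Str.lower (pvGet comp "primary_text" "")

def infer_spec_from_ui_py (ui_components : List (List (String × String))) : String :=
  let spec_parts : List String := []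
  let has_login := ui_components.any (fun comp => PySem.Str.isIn "login" (pvText comp))
  let has_register := ui_components.any (fun comp =>
      PySem.Str.isIn "register" (pvText comp) || PySem.Str.isIn "sign up" (pvText comp))
  let spec_parts := if has_login || has_register then
      spec_parts ++ ["Create authentication system with login and registration"] else spec_parts
  let input_components := ui_components.filter (fun comp => pvGet? comp "class_label" == some "input")
  let spec_parts := if PySem.List.len input_components ≥ 2 then
      spec_parts ++ ["Create form handling endpoints for user data submission"] else spec_parts
  let has_tables := ui_components.any (fun comp => pvGet? comp "class_label" == some "table")
  let has_lists := ui_components.any (fun comp => pvGet? comp "class_label" == some "list")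
  let has_cards := ui_components.any (fun comp => pvGet? comp "class_label" == some "card")
  let spec_parts := if has_tables || has_lists || has_cards then
      spec_parts ++ ["Create CRUD endpoints for data management"] else spec_parts
  let spec_parts := if spec_parts.isEmpty then
      spec_parts ++ ["Create basic REST API with user management"] else spec_parts
  PySem.Str.join ". " spec_parts

-- ===== PORT B =====
-- one loop iteration of Source B: state = (has_login, has_register, input_count, has_table, has_list, has_card)
def pvStep (s : Bool × Bool × Int × Bool × Bool × Bool) (comp : List (String × String)) :
    Bool × Bool × Int × Bool × Bool × Bool :=
  let (hl, hr, ic, ht, hli, hc) := s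
  let text := pvText comp
  let hl := hl || PySem.Str.isIn "login" text
  let hr := hr || PySem.Str.isIn "register" text || PySem.Str.isIn "sign up" text
  let label := pvGet comp "class_label" ""
  if label == "input" then (hl, hr, ic + 1, ht, hli, hc)
  else if label == "table" then (hl, hr, ic, true, hli, hc)
  else if label == "list" then (hl, hr, ic, ht, true, hc)
  else if label == "card" then (hl, hr, ic, ht, hli, true)
  else (hl, hr, ic, ht, hli, hc)

def infer_spec_from_ui_py_alt (ui_components : List (List (String × String))) : String :=
  let (hl, hr, ic, ht, hli, hc) :=
    ui_components.foldl pvStep (false, false, (0 : Int), false, false, false)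
  let spec_parts : List String := []
  let spec_parts := if hl || hr then
      spec_parts ++ ["Create authentication system with login and registration"] else spec_parts
  let spec_parts := if ic ≥ 2 then
      spec_parts ++ ["Create form handling endpoints for user data submission"] else spec_parts
  let spec_parts := if ht || hli || hc then
      spec_parts ++ ["Create CRUD endpoints for data management"] else spec_parts
  let spec_parts := if spec_parts.isEmpty then
      spec_parts ++ ["Create basic REST API with user management"] else spec_parts
  PySem.Str.join ". " spec_parts

-- ===== PRECONDITION & SPEC =====
def Spec_infer_spec_from_ui_py (ui_components : List (List (String × String))) (out : String) : Prop := out = infer_spec_from_ui_py_alt ui_components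
instance (ui_components : List (List (String × String))) (out : String) : Decidable (Spec_infer_spec_from_ui_py ui_components out) := by unfold Spec_infer_spec_from_ui_py; infer_instance

-- ===== CLAIM (what is proved, stated in full; the proofs are below) =====
def Claim_equal_infer_spec_from_ui_py : Prop := ∀ (ui_components : List (List (String × String))), Dom_infer_spec_from_ui_py ui_components → Spec_infer_spec_from_ui_py ui_components (infer_spec_from_ui_py ui_components)

-- ===== LEMMAS AND PROOFS =====

-- per-component characterization of one loop step of B
lemma pvStep_eq (s : Bool × Bool × Int × Bool × Bool × Bool) (c : List (String × String)) :
    pvStep s c =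
      (s.1 || PySem.Str.isIn "login" (pvText c),
       s.2.1 || (PySem.Str.isIn "register" (pvText c) || PySem.Str.isIn "sign up" (pvText c)),
       s.2.2.1 + (if pvGet c "class_label" "" == "input" then (1 : Int) else 0),
       s.2.2.2.1 || (pvGet c "class_label" "" == "table"),
       s.2.2.2.2.1 || (pvGet c "class_label" "" == "list"),
       s.2.2.2.2.2 || (pvGet c "class_label" "" == "card")) := by
  obtain ⟨hl, hr, ic, ht, hli, hc⟩ := s
  simp only [pvStep]
  split_ifs with h1 h2 h3 h4 <;> simp_all [Bool.or_assoc]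

-- the fold computes exactly the six scans
lemma pvFold_eq (ui : List (List (String × String))) (hl hr ht hli hc : Bool) (ic : Int) :
    ui.foldl pvStep (hl, hr, ic, ht, hli, hc) =
      (hl || ui.any (fun c => PySem.Str.isIn "login" (pvText c)),
       hr || ui.any (fun c => PySem.Str.isIn "register" (pvText c) || PySem.Str.isIn "sign up" (pvText c)),
       ic + (ui.countP (fun c => pvGet c "class_label" "" == "input") : Int),
       ht || ui.any (fun c => pvGet c "class_label" "" == "table"),
       hli || ui.any (fun c => pvGet c "class_label" "" == "list"),
       hc || ui.any (fun c => pvGet c "class_label" "" == "card")) := by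
  induction ui generalizing hl hr ic ht hli hc with
  | nil => simp
  | cons c tl ih =>
    rw [List.foldl_cons, pvStep_eq, ih]
    simp [List.any_cons, List.countP_cons, Bool.or_assoc]
    split_ifs <;> omega


-- the two label tests agree: comp.get("class_label") == "input" ↔ comp.get("class_label", "") == "input", etc.
lemma pvLabel_eq (c : List (String × String)) (v : String) (hv : v ≠ "") :
    (pvGet? c "class_label" == some v) = (pvGet c "class_label" "" == v) := by
  unfold pvGet pvGet?
  rw [PySem.Dict.getD_eq_get?_getD]
  cases h : (PySem.Dict.mk c).get? "class_label" with
  | none => simp [Ne.symm hv]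
  | some w => simp

-- ===== VERDICT (by name: the statement is the Claim_ definition above) =====
theorem infer_spec_from_ui_py_spec : Claim_equal_infer_spec_from_ui_py := by
  intro ui _
  show _ = _
  unfold infer_spec_from_ui_py infer_spec_from_ui_py_alt
  rw [pvFold_eq]
  simp only [Bool.false_or, zero_add, List.countP_eq_length_filter, PySem.List.len_eq,
    pvLabel_eq _ "input" (by decide), pvLabel_eq _ "table" (by decide),
    pvLabel_eq _ "list" (by decide), pvLabel_eq _ "card" (by decide)]
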